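-- pv_equiv track=rewrite | github.com/abdulle-sabaf/yuwen | code/outils.py | sort_dict_with
-- ===== SOURCE A (Python) =====
-- def sort_dict_with(dic, key="grade"):
--     """"sort a dictionary according to the value of a certain key
--     """
--     pox = {}
--     keys = []
--     for k, v in dic.items():
--         if v[key] not in pox:
--             pox[v[key]] = []
--             keys.append(v[key])
--         pox[v[key]].append((k, v))
--
--     out = []
--     for key in sorted(keys):
--         out.extend(pox[key])
--     return out
-- ===== SOURCE B (Python) =====
-- def sort_dict_with(dic, key="grade"):
--     """Sort a dictionary's items by the value of a nested key (stable)."""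
--     return sorted(dic.items(), key=lambda kv: kv[1][key])
-- ===== Notes on version B (the rewrite author's own statement) =====
-- stated objective: idiomatic
-- what changed: Replaced the bucket dict + distinct-keys list + concatenation pass with a single stable keyed sort of the items, relying on sort stability to keep insertion order within equal keys.
import Mathlib
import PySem

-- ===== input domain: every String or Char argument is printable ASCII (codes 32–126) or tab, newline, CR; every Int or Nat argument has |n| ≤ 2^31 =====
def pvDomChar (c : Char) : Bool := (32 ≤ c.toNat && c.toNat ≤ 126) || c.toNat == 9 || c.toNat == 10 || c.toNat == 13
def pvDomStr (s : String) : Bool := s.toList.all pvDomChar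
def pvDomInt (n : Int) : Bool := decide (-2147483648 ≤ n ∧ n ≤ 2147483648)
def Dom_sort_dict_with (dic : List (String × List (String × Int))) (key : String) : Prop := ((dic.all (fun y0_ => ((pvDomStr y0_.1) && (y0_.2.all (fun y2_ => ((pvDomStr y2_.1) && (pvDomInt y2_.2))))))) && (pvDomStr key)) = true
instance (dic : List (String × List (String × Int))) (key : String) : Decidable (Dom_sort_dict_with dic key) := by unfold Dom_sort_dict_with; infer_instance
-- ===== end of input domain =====

-- B replaces A's bucket dict + distinct-keys list + concatenation pass with one stable keyed
-- sort of the items (idiomatic); return values only, neither version mutates its argument.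

-- ===== PORT A =====
-- v[key] on the nested dict; exact whenever the key is present (guaranteed by Pre_),
-- total stand-in default 0 where Python raises KeyError (outside Pre_).
def pvVal (key : String) (kv : String × List (String × Int)) : Int :=
  (PySem.Dict.mk kv.2).getD key 0

def sort_dict_with (dic : List (String × List (String × Int))) (key : String) : List (String × (List (String × Int))) :=
  -- pox = {}; keys = []; for k, v in dic.items(): if v[key] not in pox: pox[v[key]] = []; keys.append(v[key]); pox[v[key]].append((k, v))
  let st := dic.foldl
    (fun (st : PySem.Dict Int (List (String × List (String × Int))) × List Int) kv =>
      let c := pvVal key kv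
      let st' := if st.1.contains c then st else (st.1.insert c [], st.2 ++ [c])
      (st'.1.modify c [] (fun l => l ++ [kv]), st'.2))
    (PySem.Dict.empty, [])
  -- out = []; for key in sorted(keys): out.extend(pox[key]); return out
  (PySem.List.sorted st.2 (fun k => k) false).foldl (fun out k => out ++ st.1.getD k []) []

-- ===== PORT B =====
def sort_dict_with_alt (dic : List (String × List (String × Int))) (key : String) : List (String × (List (String × Int))) :=
  -- return sorted(dic.items(), key=lambda kv: kv[1][key])
  PySem.List.sorted dic (fun kv => pvVal key kv) false

-- ===== PRECONDITION & SPEC =====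
-- Pre_ excludes exactly the inputs where Python A raises KeyError: some item's nested dict
-- lacks the requested key (B raises the very same KeyError there).
def Pre_sort_dict_with (dic : List (String × List (String × Int))) (key : String) : Prop :=
  (dic.all (fun kv => (PySem.Dict.mk kv.2).contains key)) = true
instance (dic : List (String × List (String × Int))) (key : String) : Decidable (Pre_sort_dict_with dic key) := by unfold Pre_sort_dict_with; infer_instance

def pvWitness_sort_dict_with : (List (String × List (String × Int))) × String :=
  ([("b", [("grade", 2), ("x", 0)]), ("a", [("grade", 1)]), ("c", [("grade", 2)])], "grade")

def Spec_sort_dict_with (dic : List (String × List (String × Int))) (key : String) (out : List (String × (List (String × Int)))) : Prop := out = sort_dict_with_alt dic key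
instance (dic : List (String × List (String × Int))) (key : String) (out : List (String × (List (String × Int)))) : Decidable (Spec_sort_dict_with dic key out) := by unfold Spec_sort_dict_with; infer_instance

-- ===== CLAIM (what is proved, stated in full; the proofs are below) =====
def Claim_equal_sort_dict_with : Prop := ∀ (dic : List (String × List (String × Int))) (key : String), Dom_sort_dict_with dic key → Pre_sort_dict_with dic key → Spec_sort_dict_with dic key (sort_dict_with dic key)

-- ===== LEMMAS AND PROOFS =====

-- insertBy puts x in front when it goes before every element (or the list is empty)
theorem pv_insertBy_front {α : Type} (before : α → α → Bool) (x : α) (L : List α)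
    (h : ∀ y ∈ L, before x y = true) : PySem.List.insertBy before x L = x :: L := by
  cases L with
  | nil => rfl
  | cons a L => simp [PySem.List.insertBy, h a (by simp)]

-- insertBy skips a prefix it goes after
theorem pv_insertBy_skip {α : Type} (before : α → α → Bool) (x : α) (L1 L2 : List α)
    (h : ∀ y ∈ L1, before x y = false) :
    PySem.List.insertBy before x (L1 ++ L2) = L1 ++ PySem.List.insertBy before x L2 := by
  induction L1 with
  | nil => rfl
  | cons a L1 ih =>
    have ha := h a (by simp)
    simp only [List.cons_append, PySem.List.insertBy, ha, Bool.false_eq_true, if_false]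
    exact congrArg (a :: ·) (ih (fun y hy => h y (by simp [hy])))

-- insert an int into a strictly increasing list (no-op if present)
def insK (c : Int) : List Int → List Int
  | [] => [c]
  | k :: ks => if c < k then c :: k :: ks else if c = k then k :: ks else k :: insK c ks

theorem pv_insK_of_mem (c : Int) (ks : List Int) (hp : ks.Pairwise (· < ·)) (h : c ∈ ks) :
    insK c ks = ks := by
  induction ks with
  | nil => simp at h
  | cons k ks ih =>
    obtain ⟨hk, hp'⟩ := List.pairwise_cons.mp hp
    rcases List.mem_cons.mp h with h | h
    · simp [insK, h]
    · have hkc : k < c := hk c h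
      simp [insK, not_lt.mpr (le_of_lt hkc), (ne_of_gt hkc : c ≠ k), ih hp' h]

theorem pv_insK_of_not_mem (c : Int) (ks : List Int) (h : c ∉ ks) :
    insK c ks = PySem.List.insertBy (fun a b => decide (a < b)) c ks := by
  induction ks with
  | nil => rfl
  | cons k ks ih =>
    have hne : c ≠ k := fun e => h (by simp [e])
    by_cases hlt : c < k
    · simp [insK, hlt, PySem.List.insertBy]
    · simp [insK, hlt, hne, PySem.List.insertBy, ih (fun m => h (by simp [m]))]

-- groups whose key is absent from ls are unchanged by appending x
theorem pv_flatMap_skip {α : Type} (f : α → Int) (x : α) (xs : List α) (ls : List Int)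
    (h : f x ∉ ls) :
    ls.flatMap (fun k => (xs ++ [x]).filter (fun y => f y == k))
      = ls.flatMap (fun k => xs.filter (fun y => f y == k)) := by
  induction ls with
  | nil => rfl
  | cons k ls ih =>
    have hk : (f x == k) = false := beq_eq_false_iff_ne.mpr (fun e => h (by simp [e]))
    rw [List.flatMap_cons, List.flatMap_cons, List.filter_append]
    have hone : List.filter (fun y => f y == k) [x] = [] := by simp [hk]
    rw [hone, List.append_nil, ih (fun m => h (by simp [m]))]

-- the stability core: inserting x into a key-grouped list regroups with its key inserted
theorem pv_core {α : Type} (f : α → Int) (x : α) (xs : List α) :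
    ∀ (ks : List Int), ks.Pairwise (· < ·) → (f x ∈ ks ∨ ∀ y ∈ xs, f y ≠ f x) →
    PySem.List.insertBy (fun a b => decide (f a < f b)) x
        (ks.flatMap (fun k => xs.filter (fun y => f y == k)))
      = (insK (f x) ks).flatMap (fun k => (xs ++ [x]).filter (fun y => f y == k)) := by
  intro ks
  induction ks with
  | nil =>
    intro _ hcov
    have hcov' : ∀ y ∈ xs, f y ≠ f x := by
      rcases hcov with h | h
      · simp at h
      · exact h
    have hfil : xs.filter (fun y => f y == f x) = [] :=
      List.filter_eq_nil_iff.mpr (fun y hy => by simpa using hcov' y hy)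
    simp [insK, PySem.List.insertBy, List.filter_append, hfil, List.filter]
  | cons k ks ih =>
    intro hp hcov
    obtain ⟨hpk, hptail⟩ := List.pairwise_cons.mp hp
    have hkey : ∀ k' y, y ∈ xs.filter (fun y => f y == k') → f y = k' := by
      intro k' y hy
      simpa using (List.mem_filter.mp hy).2
    rcases lt_trichotomy (f x) k with hlt | heq | hgt
    · -- f x < k : x becomes a new first group
      have hnmem : f x ∉ k :: ks := by
        intro hm
        rcases List.mem_cons.mp hm with e | e
        · exact absurd e (ne_of_lt hlt)
        · exact absurd hlt (not_lt.mpr (le_of_lt (hpk _ e)))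
      have hcov' : ∀ y ∈ xs, f y ≠ f x := by
        rcases hcov with h | h
        · exact absurd h hnmem
        · exact h
      have hfront : ∀ y ∈ (k :: ks).flatMap (fun k => xs.filter (fun y => f y == k)),
          (fun a b => decide (f a < f b)) x y = true := by
        intro y hy
        rcases List.mem_flatMap.mp hy with ⟨k', hk', hyf⟩
        have hyk : f y = k' := hkey k' y hyf
        have : f x < k' := by
          rcases List.mem_cons.mp hk' with e | e
          · exact e ▸ hlt
          · exact lt_trans hlt (hpk _ e)
        simp [hyk, this]
      rw [pv_insertBy_front _ _ _ hfront]
      have hfil : xs.filter (fun y => f y == f x) = [] :=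
        List.filter_eq_nil_iff.mpr (fun y hy => by simpa using hcov' y hy)
      rw [show insK (f x) (k :: ks) = f x :: k :: ks from by simp [insK, hlt]]
      have hr : List.flatMap (fun k => List.filter (fun y => f y == k) (xs ++ [x]))
            (f x :: k :: ks)
          = x :: List.flatMap (fun k => List.filter (fun y => f y == k) xs) (k :: ks) := by
        rw [List.flatMap_cons, pv_flatMap_skip f x xs (k :: ks) hnmem,
          List.filter_append, hfil]
        simp
      rw [hr, List.flatMap_cons]
    · -- f x = k : x joins the end of the first group
      have hnmemks : f x ∉ ks := fun m => absurd (hpk _ m) (by rw [heq]; exact lt_irrefl k)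
      have hskip : ∀ y ∈ xs.filter (fun y => f y == k), (fun a b => decide (f a < f b)) x y = false := by
        intro y hy
        have := hkey k y hy
        simp [this, heq]
      have hfront : ∀ y ∈ ks.flatMap (fun k => xs.filter (fun y => f y == k)),
          (fun a b => decide (f a < f b)) x y = true := by
        intro y hy
        rcases List.mem_flatMap.mp hy with ⟨k', hk', hyf⟩
        have hyk : f y = k' := hkey k' y hyf
        have : f x < k' := heq ▸ hpk _ hk'
        simp [hyk, this]
      rw [List.flatMap_cons, pv_insertBy_skip _ _ _ _ hskip, pv_insertBy_front _ _ _ hfront]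
      rw [show insK (f x) (k :: ks) = k :: ks from by simp [insK, heq]]
      rw [List.flatMap_cons, pv_flatMap_skip f x xs ks hnmemks, List.filter_append]
      have hone : List.filter (fun y => f y == k) [x] = [x] := by simp [heq]
      rw [hone]
      simp
    · -- k < f x : skip the first group and recurse
      have hne : f x ≠ k := ne_of_gt hgt
      have hskip : ∀ y ∈ xs.filter (fun y => f y == k), (fun a b => decide (f a < f b)) x y = false := by
        intro y hy
        have := hkey k y hy
        simp [this, not_lt.mpr (le_of_lt hgt)]
      have hcov' : f x ∈ ks ∨ ∀ y ∈ xs, f y ≠ f x := by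
        rcases hcov with h | h
        · rcases List.mem_cons.mp h with e | e
          · exact absurd e hne
          · exact Or.inl e
        · exact Or.inr h
      rw [List.flatMap_cons, pv_insertBy_skip _ _ _ _ hskip, ih hptail hcov']
      rw [show insK (f x) (k :: ks) = k :: insK (f x) ks from by
        simp [insK, not_lt.mpr (le_of_lt hgt), hne]]
      rw [List.flatMap_cons, List.filter_append]
      have hone : List.filter (fun y => f y == k) [x] = [] := by simp [hne]
      rw [hone, List.append_nil]

-- B computes the canonical grouped form: sorted distinct keys, each key's items in list order
theorem pv_B_char {α : Type} (f : α → Int) (xs : List α) :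
    PySem.List.sorted xs f false
      = (PySem.List.sorted (PySem.List.dedup (xs.map f)) (fun k => k) false).flatMap
          (fun k => xs.filter (fun y => f y == k)) := by
  induction xs using List.reverseRecOn with
  | nil => simp [PySem.List.sorted_eq_foldl_insertBy, PySem.List.dedup, PySem.Set.ofList]
  | append_singleton xs x ih =>
    have hstep : PySem.List.sorted (xs ++ [x]) f false
        = PySem.List.insertBy (fun a b => decide (f a < f b)) x (PySem.List.sorted xs f false) := by
      rw [PySem.List.sorted_eq_foldl_insertBy, PySem.List.sorted_eq_foldl_insertBy,
        List.foldl_append, List.foldl_cons, List.foldl_nil]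
    simp only [PySem.List.dedup_eq_ofList] at ih ⊢
    have hK := PySem.List.sorted_ofList_pairwise_lt (xs.map f)
    have hcov : f x ∈ PySem.List.sorted (PySem.Set.ofList (xs.map f)) (fun k => k) false
        ∨ ∀ y ∈ xs, f y ≠ f x := by
      by_cases h : f x ∈ xs.map f
      · exact Or.inl ((PySem.List.mem_sorted _ _ _ _).mpr ((PySem.Set.mem_ofList _ _).mpr h))
      · exact Or.inr (fun y hy e => h (List.mem_map.mpr ⟨y, hy, e⟩))
    rw [hstep, ih, pv_core f x xs _ hK hcov]
    congr 1
    rw [List.map_append, List.map_cons, List.map_nil, PySem.Set.ofList_append_singleton]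
    by_cases h : f x ∈ xs.map f
    · rw [PySem.Set.add_of_mem ((PySem.Set.mem_ofList _ _).mpr h)]
      exact pv_insK_of_mem _ _ hK
        ((PySem.List.mem_sorted _ _ _ _).mpr ((PySem.Set.mem_ofList _ _).mpr h))
    · rw [PySem.Set.add_of_not_mem (fun m => h ((PySem.Set.mem_ofList _ _).mp m))]
      have h2 : PySem.List.sorted (PySem.Set.ofList (xs.map f) ++ [f x]) (fun k => k) false
          = PySem.List.insertBy (fun a b => decide (a < b)) (f x)
              (PySem.List.sorted (PySem.Set.ofList (xs.map f)) (fun k => k) false) := by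
        rw [PySem.List.sorted_eq_foldl_insertBy, PySem.List.sorted_eq_foldl_insertBy,
          List.foldl_append, List.foldl_cons, List.foldl_nil]
      rw [h2, pv_insK_of_not_mem _ _
        (fun m => h ((PySem.Set.mem_ofList _ _).mp ((PySem.List.mem_sorted _ _ _ _).mp m)))]

-- A's loop body, named for the proofs (the port inlines the same lambda)
def pvStepA (key : String)
    (st : PySem.Dict Int (List (String × List (String × Int))) × List Int)
    (kv : String × List (String × Int)) :
    PySem.Dict Int (List (String × List (String × Int))) × List Int :=
  let c := pvVal key kv
  let st' := if st.1.contains c then st else (st.1.insert c [], st.2 ++ [c])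
  (st'.1.modify c [] (fun l => l ++ [kv]), st'.2)

-- A's fold: bucket contents, key membership, distinct keys in first-seen order
theorem pv_A_fold (key : String) (l : List (String × List (String × Int))) :
    (∀ c, (l.foldl (pvStepA key) (PySem.Dict.empty, [])).1.getD c []
        = l.filter (fun y => pvVal key y == c))
    ∧ (∀ c, (l.foldl (pvStepA key) (PySem.Dict.empty, [])).1.contains c
        = decide (c ∈ l.map (pvVal key)))
    ∧ (l.foldl (pvStepA key) (PySem.Dict.empty, [])).2
        = PySem.List.dedup (l.map (pvVal key)) := by
  induction l using List.reverseRecOn with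
  | nil =>
    refine ⟨fun c => ?_, fun c => ?_, ?_⟩
    · simp [PySem.Dict.getD_empty]
    · simp [PySem.Dict.contains_empty]
    · simp [PySem.List.dedup, PySem.Set.ofList]
  | append_singleton l x ih =>
    obtain ⟨ih1, ih2, ih3⟩ := ih
    rw [List.foldl_append, List.foldl_cons, List.foldl_nil] at *
    set P := l.foldl (pvStepA key) (PySem.Dict.empty, []) with hP
    by_cases hc : P.1.contains (pvVal key x) = true
    · -- key already seen
      have hmem : pvVal key x ∈ l.map (pvVal key) := by
        have := ih2 (pvVal key x); rw [hc] at this; exact of_decide_eq_true this.symm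
      refine ⟨fun c' => ?_, fun c' => ?_, ?_⟩
      · simp only [pvStepA, hc, if_true, PySem.Dict.getD_modify]
        by_cases he : c' = pvVal key x
        · simp [he, ih1, List.filter_append, List.filter]
        · simp [he, ih1, List.filter_append, List.filter,
            beq_eq_false_iff_ne.mpr (Ne.symm he)]
      · simp only [pvStepA, hc, if_true, PySem.Dict.contains_modify, ih2]
        rw [List.map_append, List.map_cons, List.map_nil]
        by_cases he : c' = pvVal key x
        · subst he; simp
        · have hb : (c' == pvVal key x) = false := by simpa using he
          rw [hb]
          simp [List.mem_append, he]
      · simp only [pvStepA, hc, if_true]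
        rw [ih3, List.map_append, List.map_cons, List.map_nil,
          PySem.List.dedup_eq_ofList, PySem.List.dedup_eq_ofList,
          PySem.Set.ofList_append_singleton,
          PySem.Set.add_of_mem ((PySem.Set.mem_ofList _ _).mpr hmem)]
    · -- new key
      have hc' : P.1.contains (pvVal key x) = false := by
        cases h : P.1.contains (pvVal key x)
        · rfl
        · exact absurd h hc
      have hnmem : pvVal key x ∉ l.map (pvVal key) := by
        intro m
        have := ih2 (pvVal key x)
        rw [hc', decide_eq_true m] at this
        exact Bool.false_ne_true this
      have hfil : l.filter (fun y => pvVal key y == pvVal key x) = [] := by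
        apply List.filter_eq_nil_iff.mpr
        intro y hy e
        exact hnmem (List.mem_map.mpr ⟨y, hy, by simpa using e⟩)
      have hdict : ((P.1.insert (pvVal key x) []).modify (pvVal key x) [] (fun l => l ++ [x]))
          = P.1.insert (pvVal key x) [x] := by
        simp [PySem.Dict.modify, PySem.Dict.getD_insert_self, PySem.Dict.insert_insert_self]
      refine ⟨fun c' => ?_, fun c' => ?_, ?_⟩
      · simp only [pvStepA, hc', Bool.false_eq_true, if_false, hdict, PySem.Dict.getD_insert]
        by_cases he : c' = pvVal key x
        · simp [he, hfil, List.filter_append, List.filter]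
        · simp [he, ih1, List.filter_append, List.filter,
            beq_eq_false_iff_ne.mpr (Ne.symm he)]
      · simp only [pvStepA, hc', Bool.false_eq_true, if_false, hdict,
          PySem.Dict.contains_insert, ih2]
        rw [List.map_append, List.map_cons, List.map_nil]
        by_cases he : c' = pvVal key x
        · subst he; simp
        · have hb : (c' == pvVal key x) = false := by simpa using he
          rw [hb]
          simp [List.mem_append, he]
      · simp only [pvStepA, hc', Bool.false_eq_true, if_false]
        rw [ih3, List.map_append, List.map_cons, List.map_nil,
          PySem.List.dedup_eq_ofList, PySem.List.dedup_eq_ofList,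
          PySem.Set.ofList_append_singleton,
          PySem.Set.add_of_not_mem (fun m => hnmem ((PySem.Set.mem_ofList _ _).mp m))]

-- ===== VERDICT (by name: the statement is the Claim_ definition above) =====
theorem sort_dict_with_spec : Claim_equal_sort_dict_with := by
  intro dic key _ _
  unfold Spec_sort_dict_with sort_dict_with sort_dict_with_alt
  obtain ⟨h1, _, h3⟩ := pv_A_fold key dic
  show (PySem.List.sorted (dic.foldl (pvStepA key) (PySem.Dict.empty, [])).2 (fun k => k) false).foldl
      (fun out k => out ++ (dic.foldl (pvStepA key) (PySem.Dict.empty, [])).1.getD k []) []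
    = PySem.List.sorted dic (fun kv => pvVal key kv) false
  rw [h3, PySem.List.foldl_append_eq_flatMap, List.nil_append,
    funext h1, ← pv_B_char (pvVal key) dic]
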